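-- pv_equiv track=rewrite | github.com/gregbarnette-cyber/SpaceAndScienceFictionApp | core/databases.py | _parse_designations_from_ids
-- ===== SOURCE A (Python) =====
-- _CSV_DESIG_KEYS = [
--     "GJ", "HD", "HIP", "HR", "Wolf", "LHS", "BD",
--     "K2", "Kepler", "KOI", "TOI", "CoRoT", "COCONUTS", "HAT_P", "WASP",
--     "TIC", "Gaia EDR3", "2MASS",
-- ]
--
-- _CSV_PREFIX_MAP = [
--     ("GJ ",         "GJ"),
--     ("HD ",         "HD"),
--     ("HIP ",        "HIP"),
--     ("HR ",         "HR"),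
--     ("Wolf ",       "Wolf"),
--     ("LHS ",        "LHS"),
--     ("BD+",         "BD"),
--     ("BD-",         "BD"),
--     ("BD ",         "BD"),
--     ("K2 ",         "K2"),
--     ("Kepler-",     "Kepler"),
--     ("Kepler ",     "Kepler"),
--     ("KOI-",        "KOI"),
--     ("KOI ",        "KOI"),
--     ("TOI-",        "TOI"),
--     ("TOI ",        "TOI"),
--     ("CoRoT-",      "CoRoT"),
--     ("CoRoT ",      "CoRoT"),
--     ("COCONUTS-",   "COCONUTS"),
--     ("HAT-P-",      "HAT_P"),
--     ("WASP-",       "WASP"),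
--     ("TIC ",        "TIC"),
--     ("Gaia EDR3 ",  "Gaia EDR3"),
--     ("2MASS J",     "2MASS"),
--     ("2MASS ",      "2MASS"),
-- ]
--
-- def _parse_designations_from_ids(ids_string: str) -> str:
--     """Parse a pipe-separated SIMBAD ids string into a comma-separated designation string."""
--     desig = {k: None for k in _CSV_DESIG_KEYS}
--     if not ids_string:
--         return ""
--     for id_str in ids_string.split("|"):
--         id_str = id_str.strip()
--         for prefix, key in _CSV_PREFIX_MAP:
--             if id_str.startswith(prefix) and desig[key] is None:
--                 desig[key] = id_str
--                 break
--     parts = [desig[k] for k in _CSV_DESIG_KEYS if desig[k] is not None]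
--     return ", ".join(parts)
-- ===== SOURCE B (Python) =====
-- _CSV_DESIG_KEYS = [
--     "GJ", "HD", "HIP", "HR", "Wolf", "LHS", "BD",
--     "K2", "Kepler", "KOI", "TOI", "CoRoT", "COCONUTS", "HAT_P", "WASP",
--     "TIC", "Gaia EDR3", "2MASS",
-- ]
--
-- _CSV_PREFIX_MAP = [
--     ("GJ ",         "GJ"),
--     ("HD ",         "HD"),
--     ("HIP ",        "HIP"),
--     ("HR ",         "HR"),
--     ("Wolf ",       "Wolf"),
--     ("LHS ",        "LHS"),
--     ("BD+",         "BD"),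
--     ("BD-",         "BD"),
--     ("BD ",         "BD"),
--     ("K2 ",         "K2"),
--     ("Kepler-",     "Kepler"),
--     ("Kepler ",     "Kepler"),
--     ("KOI-",        "KOI"),
--     ("KOI ",        "KOI"),
--     ("TOI-",        "TOI"),
--     ("TOI ",        "TOI"),
--     ("CoRoT-",      "CoRoT"),
--     ("CoRoT ",      "CoRoT"),
--     ("COCONUTS-",   "COCONUTS"),
--     ("HAT-P-",      "HAT_P"),
--     ("WASP-",       "WASP"),
--     ("TIC ",        "TIC"),
--     ("Gaia EDR3 ",  "Gaia EDR3"),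
--     ("2MASS J",     "2MASS"),
--     ("2MASS ",      "2MASS"),
-- ]
--
--
-- def _parse_designations_from_ids(ids_string: str) -> str:
--     """Key-driven variant: index prefixes by designation key, then for each
--     output key (in order) scan the token list for its first match."""
--     if not ids_string:
--         return ""
--     key_prefixes = {k: [] for k in _CSV_DESIG_KEYS}
--     for prefix, key in _CSV_PREFIX_MAP:
--         key_prefixes[key].append(prefix)
--     tokens = [t.strip() for t in ids_string.split("|")]
--     found = []
--     for key in _CSV_DESIG_KEYS:
--         prefixes = key_prefixes[key]
--         for tok in tokens:
--             if any(tok.startswith(p) for p in prefixes):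
--                 found.append(tok)
--                 break
--     return ", ".join(found)
-- ===== Notes on version B (the rewrite author's own statement) =====
-- stated objective: alternative
-- what changed: Inverts the loop nesting: B builds a key->prefixes index once and drives the scan by output designation keys (for each key, find the first matching token), instead of A's token-driven loop that fills a None-initialized dict with a break over the flat prefix list.
import Mathlib
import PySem

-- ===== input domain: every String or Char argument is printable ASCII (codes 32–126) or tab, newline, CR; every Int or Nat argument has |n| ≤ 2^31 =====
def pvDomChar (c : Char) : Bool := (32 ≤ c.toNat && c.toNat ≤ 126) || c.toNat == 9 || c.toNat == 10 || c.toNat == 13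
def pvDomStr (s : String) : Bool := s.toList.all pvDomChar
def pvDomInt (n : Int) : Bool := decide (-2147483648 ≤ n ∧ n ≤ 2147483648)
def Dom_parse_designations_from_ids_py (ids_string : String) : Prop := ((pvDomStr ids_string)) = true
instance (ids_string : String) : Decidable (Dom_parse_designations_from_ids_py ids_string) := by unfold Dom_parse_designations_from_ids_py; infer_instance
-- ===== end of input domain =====

-- B inverts the loop nesting: a key->prefixes index drives an output-key-ordered scan of the
-- tokens, replacing A's token-driven fill of a None-initialized dict (alternative decomposition).

-- ===== PORT A =====
def pvDesigKeys : List String :=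
  ["GJ", "HD", "HIP", "HR", "Wolf", "LHS", "BD",
   "K2", "Kepler", "KOI", "TOI", "CoRoT", "COCONUTS", "HAT_P", "WASP",
   "TIC", "Gaia EDR3", "2MASS"]

def pvPrefixMap : List (String × String) :=
  [("GJ ", "GJ"), ("HD ", "HD"), ("HIP ", "HIP"), ("HR ", "HR"),
   ("Wolf ", "Wolf"), ("LHS ", "LHS"),
   ("BD+", "BD"), ("BD-", "BD"), ("BD ", "BD"),
   ("K2 ", "K2"), ("Kepler-", "Kepler"), ("Kepler ", "Kepler"),
   ("KOI-", "KOI"), ("KOI ", "KOI"), ("TOI-", "TOI"), ("TOI ", "TOI"),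
   ("CoRoT-", "CoRoT"), ("CoRoT ", "CoRoT"), ("COCONUTS-", "COCONUTS"),
   ("HAT-P-", "HAT_P"), ("WASP-", "WASP"), ("TIC ", "TIC"),
   ("Gaia EDR3 ", "Gaia EDR3"), ("2MASS J", "2MASS"), ("2MASS ", "2MASS")]

-- A's inner 'for prefix, key in _CSV_PREFIX_MAP: … break' loop (desig[key] read via getD: all keys are present)
def pvAInner : List (String × String) → PySem.Dict String (Option String) → String → PySem.Dict String (Option String)
  | [], d, _ => d
  | (p, k) :: rest, d, t =>
      if PySem.Str.startswith t p = true ∧ d.getD k none = none then d.insert k (some t)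
      else pvAInner rest d t

def parse_designations_from_ids_py (ids_string : String) : String :=
  let desig : PySem.Dict String (Option String) :=
    pvDesigKeys.foldl (fun d k => d.insert k none) PySem.Dict.empty
  if ids_string = "" then ""
  else
    let desig := ((PySem.Str.split? ids_string "|").getD []).foldl
      (fun d id_str => pvAInner pvPrefixMap d (PySem.Str.strip id_str)) desig
    PySem.Str.join ", " (pvDesigKeys.filterMap (fun k => desig.getD k none))

-- ===== PORT B =====
-- key_prefixes = {k: [] for k in KEYS}; for prefix, key in MAP: key_prefixes[key].append(prefix)
def pvKeyPrefixes : PySem.Dict String (List String) :=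
  pvPrefixMap.foldl (fun d pk => d.modify pk.2 [] (· ++ [pk.1]))
    (pvDesigKeys.foldl (fun d k => d.insert k []) PySem.Dict.empty)

def parse_designations_from_ids_py_alt (ids_string : String) : String :=
  if ids_string = "" then ""
  else
    let tokens := ((PySem.Str.split? ids_string "|").getD []).map PySem.Str.strip
    let found := pvDesigKeys.filterMap (fun key =>
      tokens.find? (fun tok =>
        (pvKeyPrefixes.getD key []).any (fun p => PySem.Str.startswith tok p)))
    PySem.Str.join ", " found

-- ===== PRECONDITION & SPEC =====
def Spec_parse_designations_from_ids_py (ids_string : String) (out : String) : Prop := out = parse_designations_from_ids_py_alt ids_string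
instance (ids_string : String) (out : String) : Decidable (Spec_parse_designations_from_ids_py ids_string out) := by unfold Spec_parse_designations_from_ids_py; infer_instance

-- ===== CLAIM (what is proved, stated in full; the proofs are below) =====
def Claim_equal_parse_designations_from_ids_py : Prop := ∀ (ids_string : String), Dom_parse_designations_from_ids_py ids_string → Spec_parse_designations_from_ids_py ids_string (parse_designations_from_ids_py ids_string)

-- ===== LEMMAS AND PROOFS =====

-- the key of the first prefix in the map that a token starts with (what A's break selects)
def pvTokKey (t : String) : Option String :=
  (pvPrefixMap.find? (fun pk => PySem.Str.startswith t pk.1)).map (·.2)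

-- any two comparable prefixes in the map carry the same key (concrete check)
lemma pvDisjoint : ∀ p1 ∈ pvPrefixMap, ∀ p2 ∈ pvPrefixMap,
    (p1.1.toList <+: p2.1.toList ∨ p2.1.toList <+: p1.1.toList) → p1.2 = p2.2 := by decide

lemma pvKeysAgree {t : String} {pk1 pk2 : String × String}
    (h1 : pk1 ∈ pvPrefixMap) (h2 : pk2 ∈ pvPrefixMap)
    (s1 : PySem.Str.startswith t pk1.1 = true) (s2 : PySem.Str.startswith t pk2.1 = true) :
    pk1.2 = pk2.2 := by
  apply pvDisjoint pk1 h1 pk2 h2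
  rw [PySem.Str.startswith_eq, PySem.Chars.startswith_iff] at s1 s2
  exact List.prefix_or_prefix_of_prefix s1 s2


-- A's inner loop = first matching prefix decides; a filled slot leaves the dict unchanged
lemma pvAInner_eq (t : String) : ∀ (l : List (String × String)) (d : PySem.Dict String (Option String)),
    (∀ pk ∈ l, ∀ pk' ∈ l, PySem.Str.startswith t pk.1 = true → PySem.Str.startswith t pk'.1 = true → pk.2 = pk'.2) →
    pvAInner l d t =
      (l.find? (fun pk => PySem.Str.startswith t pk.1)).elim d
        (fun pk => if d.getD pk.2 none = none then d.insert pk.2 (some t) else d)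
  | [], d, _ => by simp [pvAInner]
  | (p, k) :: rest, d, H => by
    by_cases hs : PySem.Str.startswith t p = true
    · rw [List.find?_cons_of_pos (by simpa using hs), Option.elim_some]
      by_cases hd : d.getD k none = none
      · simp only [pvAInner]
        rw [if_pos ⟨hs, hd⟩, if_pos hd]
      · simp only [pvAInner]
        rw [if_neg (by rintro ⟨_, h2⟩; exact hd h2), if_neg hd]
        rw [pvAInner_eq t rest d (fun a ha b hb => H a (.tail _ ha) b (.tail _ hb))]
        cases hf : rest.find? (fun pk => PySem.Str.startswith t pk.1) with
        | none => rw [Option.elim_none]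
        | some pk' =>
          have hmem := List.mem_of_find?_eq_some hf
          have hsw : PySem.Str.startswith t pk'.1 = true := by simpa using List.find?_some hf
          have hkk : pk'.2 = k := H pk' (.tail _ hmem) (p, k) (.head _) hsw hs
          rw [Option.elim_some, hkk, if_neg hd]
    · rw [List.find?_cons_of_neg (by simpa using hs)]
      simp only [pvAInner]
      rw [if_neg (by rintro ⟨h1, _⟩; exact hs h1)]
      exact pvAInner_eq t rest d (fun a ha b hb => H a (.tail _ ha) b (.tail _ hb))

-- A's whole token loop, read through getD: a slot holds the first token whose first matching prefix has that key
lemma pvFold : ∀ (toks : List String) (d : PySem.Dict String (Option String)) (k : String),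
    ((toks.foldl (fun d t => pvAInner pvPrefixMap d t) d).getD k none) =
      (d.getD k none).elim (toks.find? (fun t => pvTokKey t == some k)) some
  | [], d, k => by cases h : d.getD k none <;> simp [h]
  | t :: ts, d, k => by
    simp only [List.foldl_cons]
    rw [pvAInner_eq t pvPrefixMap d (fun a ha b hb s1 s2 => pvKeysAgree ha hb s1 s2)]
    cases hf : pvPrefixMap.find? (fun pk => PySem.Str.startswith t pk.1) with
    | none =>
      have htk : pvTokKey t = none := by simp only [pvTokKey, hf, Option.map_none]
      rw [Option.elim_none, pvFold ts d k]
      cases hd : d.getD k none with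
      | some v => rw [Option.elim_some, Option.elim_some]
      | none =>
        rw [Option.elim_none, Option.elim_none,
          List.find?_cons_of_neg (by simp [htk])]
    | some pk =>
      have htk : pvTokKey t = some pk.2 := by simp only [pvTokKey, hf, Option.map_some]
      rw [Option.elim_some]
      by_cases hd2 : d.getD pk.2 none = none
      · rw [if_pos hd2, pvFold ts (d.insert pk.2 (some t)) k]
        by_cases hk : k = pk.2
        · subst hk
          rw [PySem.Dict.getD_insert_self, hd2, Option.elim_some, Option.elim_none,
            List.find?_cons_of_pos (by simp [htk])]
        · rw [PySem.Dict.getD_insert_of_ne _ _ _ hk]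
          cases hd : d.getD k none with
          | some v => rw [Option.elim_some, Option.elim_some]
          | none =>
            rw [Option.elim_none, Option.elim_none,
              List.find?_cons_of_neg (by simp only [htk, beq_iff_eq, Option.some.injEq]; exact fun h => hk h.symm)]
      · rw [if_neg hd2, pvFold ts d k]
        by_cases hk : k = pk.2
        · rw [← hk] at hd2
          cases hd : d.getD k none with
          | some v => rw [Option.elim_some, Option.elim_some]
          | none => exact absurd hd hd2
        · cases hd : d.getD k none with
          | some v => rw [Option.elim_some, Option.elim_some]
          | none =>
            rw [Option.elim_none, Option.elim_none,
              List.find?_cons_of_neg (by simp only [htk, beq_iff_eq, Option.some.injEq]; exact fun h => hk h.symm)]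

-- concrete facts about the two concrete tables
set_option maxRecDepth 100000 in
lemma pvInit : ∀ k ∈ pvDesigKeys,
    ((pvDesigKeys.foldl (fun d k => d.insert k none) (PySem.Dict.empty : PySem.Dict String (Option String))).getD k none) = none := by
  decide

set_option maxRecDepth 100000 in
lemma pvKP : ∀ k ∈ pvDesigKeys,
    pvKeyPrefixes.getD k [] = (pvPrefixMap.filter (fun pk => pk.2 == k)).map (·.1) := by
  decide

-- B's per-key any-prefix test agrees with A's first-matching-prefix key
lemma pvPredEq (k : String) (hk : k ∈ pvDesigKeys) (t : String) :
    (pvTokKey t == some k) = (pvKeyPrefixes.getD k []).any (fun p => PySem.Str.startswith t p) := by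
  rw [pvKP k hk]
  cases hf : pvPrefixMap.find? (fun pk => PySem.Str.startswith t pk.1) with
  | none =>
    have h1 : pvTokKey t = none := by simp only [pvTokKey, hf, Option.map_none]
    rw [h1, show ((none : Option String) == some k) = false from rfl]
    symm
    rw [List.any_eq_false]
    intro p hp
    obtain ⟨pk, hpk, rfl⟩ := List.mem_map.mp hp
    have hm := (List.mem_filter.mp hpk).1
    have := List.find?_eq_none.mp hf pk hm
    simpa using this
  | some pk =>
    have h1 : pvTokKey t = some pk.2 := by simp only [pvTokKey, hf, Option.map_some]
    have hmem := List.mem_of_find?_eq_some hf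
    have hsw : PySem.Str.startswith t pk.1 = true := by simpa using List.find?_some hf
    rw [h1]
    by_cases hk2 : pk.2 = k
    · rw [show ((some pk.2 == some k) : Bool) = true by simp [hk2]]
      symm
      rw [List.any_eq_true]
      exact ⟨pk.1, List.mem_map.mpr ⟨pk, List.mem_filter.mpr ⟨hmem, by simp [hk2]⟩, rfl⟩, hsw⟩
    · rw [show ((some pk.2 == some k) : Bool) = false by simp [hk2]]
      symm
      rw [List.any_eq_false]
      intro p hp
      obtain ⟨pk', hpk', rfl⟩ := List.mem_map.mp hp
      obtain ⟨hm', hflt⟩ := List.mem_filter.mp hpk'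
      simp only [Bool.not_eq_true]
      by_contra hcon
      simp only [Bool.not_eq_false] at hcon
      have heq : pk'.2 = pk.2 := pvKeysAgree hm' hmem hcon hsw
      simp only [beq_iff_eq] at hflt
      exact hk2 (heq ▸ hflt)

-- ===== VERDICT (by name: the statement is the Claim_ definition above) =====
theorem parse_designations_from_ids_py_spec : Claim_equal_parse_designations_from_ids_py := by
  intro s _hD
  unfold Spec_parse_designations_from_ids_py
  simp only [parse_designations_from_ids_py, parse_designations_from_ids_py_alt]
  by_cases h0 : s = ""
  · rw [if_pos h0, if_pos h0]
  · rw [if_neg h0, if_neg h0]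
    congr 1
    apply List.filterMap_congr
    intro k hk
    rw [← List.foldl_map]
    rw [pvFold]
    rw [pvInit k hk]
    rw [Option.elim_none]
    have hfun : (fun t => pvTokKey t == some k)
        = (fun tok => (pvKeyPrefixes.getD k []).any (fun p => PySem.Str.startswith tok p)) :=
      funext (pvPredEq k hk)
    rw [hfun]
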